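-- pv_equiv track=rewrite | github.com/janohhank/Programming-exercises-python | solutions/011-RunningCompetition.py | getBestLaptime
-- ===== SOURCE A (Python) =====
-- def getBestLaptime(laptimesMap):
-- 	bestLaptimes = {}
-- 	minLaptime = float('inf')
-- 	for playerID, laptimes in laptimesMap.items():
-- 		laptimes.sort()
-- 		currentMin = laptimes[0]
-- 		if(currentMin < minLaptime):
-- 			minLaptime = currentMin
-- 			bestLaptimes.clear()
-- 			bestLaptimes[playerID] = minLaptime
-- 		elif(currentMin == minLaptime):
-- 			bestLaptimes[playerID] = minLaptime
-- 	return bestLaptimes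
-- ===== SOURCE B (Python) =====
-- def getBestLaptime(laptimesMap):
--     mins = {}
--     for playerID, laptimes in laptimesMap.items():
--         laptimes.sort()
--         mins[playerID] = laptimes[0]
--     if not mins:
--         return {}
--     best = min(mins.values())
--     return {playerID: m for playerID, m in mins.items() if m == best}
-- ===== Notes on version B (the rewrite author's own statement) =====
-- stated objective: alternative
-- what changed: A keeps a running minimum and clears/refills the result dict incrementally in one pass; B first builds a per-player best-lap table, then takes the minimum of its values and filters it in a second pass (dict comprehension).
import Mathlib
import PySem

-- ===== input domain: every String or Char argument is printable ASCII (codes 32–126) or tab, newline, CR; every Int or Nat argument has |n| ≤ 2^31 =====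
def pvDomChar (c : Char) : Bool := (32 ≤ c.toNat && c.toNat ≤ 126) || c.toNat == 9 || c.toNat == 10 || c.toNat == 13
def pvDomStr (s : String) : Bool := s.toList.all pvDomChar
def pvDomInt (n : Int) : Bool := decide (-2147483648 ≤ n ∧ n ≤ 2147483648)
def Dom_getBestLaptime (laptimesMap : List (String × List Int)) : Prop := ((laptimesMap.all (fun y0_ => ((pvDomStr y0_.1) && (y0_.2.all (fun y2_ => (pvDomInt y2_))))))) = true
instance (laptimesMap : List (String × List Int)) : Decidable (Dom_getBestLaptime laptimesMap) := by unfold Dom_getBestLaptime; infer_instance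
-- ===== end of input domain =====

-- B builds a per-player best-lap table first and filters it by its minimum in a second pass,
-- instead of A's one-pass running-minimum with clear-and-refill; same cost (alternative decomposition).
-- Both A and B sort each laptime list in place (mutation preserved); the theorems are about the return value.

-- ===== PORT A =====
-- laptimes.sort(); laptimes[0]  — on an empty list Python raises IndexError (excluded by Pre_); 0 is a placeholder there
def pvMinv (l : List Int) : Int :=
  match PySem.List.sorted l (fun x => x) false with
  | [] => 0
  | v :: _ => v

-- Python dict assignment d[k] = v: overwrite in place, new keys append
def pvDinsert (d : List (String × Int)) (k : String) (v : Int) : List (String × Int) :=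
  if d.any (fun kv => kv.1 == k) then d.map (fun kv => if kv.1 == k then (k, v) else kv)
  else d ++ [(k, v)]

-- minLaptime = float('inf') is modelled as `none` (any int compares below it)
def getBestLaptime (laptimesMap : List (String × List Int)) : List (String × Int) :=
  (laptimesMap.foldl
    (fun st pq =>
      let c := pvMinv pq.2
      match st.2 with
      | none => ([(pq.1, c)], some c)
      | some mn =>
        if c < mn then ([(pq.1, c)], some c)
        else if c = mn then (pvDinsert st.1 pq.1 mn, some mn)
        else st)
    (([] : List (String × Int)), (none : Option Int))).1

-- ===== PORT B =====
def getBestLaptime_alt (laptimesMap : List (String × List Int)) : List (String × Int) :=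
  let mins := laptimesMap.foldl (fun d pq => pvDinsert d pq.1 (pvMinv pq.2)) []
  if mins.isEmpty then []
  else
    match PySem.List.min? (mins.map Prod.snd) (fun x => x) with
    | none => []  -- unreachable: mins is nonempty here
    | some best => mins.filter (fun pv => pv.2 == best)

-- ===== PRECONDITION & SPEC =====
-- Pre_ excludes inputs with an empty laptime list (A raises IndexError at laptimes[0]) and inputs
-- with duplicate player IDs, which a Python dict cannot represent.
def Pre_getBestLaptime (laptimesMap : List (String × List Int)) : Prop :=
  (laptimesMap.map Prod.fst).Nodup ∧ ∀ pq ∈ laptimesMap, pq.2 ≠ []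
instance (laptimesMap : List (String × List Int)) : Decidable (Pre_getBestLaptime laptimesMap) := by
  unfold Pre_getBestLaptime; infer_instance

def pvWitness_getBestLaptime : (List (String × List Int)) := [("a", [3, 1]), ("b", [1, 2])]

def Spec_getBestLaptime (laptimesMap : List (String × List Int)) (out : List (String × Int)) : Prop := out = getBestLaptime_alt laptimesMap
instance (laptimesMap : List (String × List Int)) (out : List (String × Int)) : Decidable (Spec_getBestLaptime laptimesMap out) := by unfold Spec_getBestLaptime; infer_instance

-- ===== CLAIM (what is proved, stated in full; the proofs are below) =====
def Claim_equal_getBestLaptime : Prop := ∀ (laptimesMap : List (String × List Int)), Dom_getBestLaptime laptimesMap → Pre_getBestLaptime laptimesMap → Spec_getBestLaptime laptimesMap (getBestLaptime laptimesMap)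

-- ===== LEMMAS AND PROOFS =====

-- the per-player best table B builds
def pvMins (m : List (String × List Int)) : List (String × Int) :=
  m.map (fun pq => (pq.1, pvMinv pq.2))

-- min of a list of ints, none for []
def pvVmin : List Int → Option Int
  | [] => none
  | v :: t => some (t.foldl min v)

theorem pvVmin_eq_min? (ys : List Int) : pvVmin ys = PySem.List.min? ys (fun x => x) := by
  cases ys with
  | nil => rfl
  | cons v t => simp [pvVmin, PySem.List.min?_id_cons]

theorem pvVmin_snoc (ys : List Int) (c : Int) :
    pvVmin (ys ++ [c]) = some (match pvVmin ys with | none => c | some mn => min mn c) := by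
  cases ys with
  | nil => rfl
  | cons v t => simp [pvVmin, List.foldl_append]

theorem foldl_min_le (t : List Int) : ∀ (a : Int), t.foldl min a ≤ a ∧ ∀ v ∈ t, t.foldl min a ≤ v := by
  induction t with
  | nil => intro a; simp
  | cons x s ih =>
    intro a
    obtain ⟨h1, h2⟩ := ih (min a x)
    refine ⟨le_trans h1 (min_le_left _ _), ?_⟩
    intro v hv
    rcases List.mem_cons.mp hv with rfl | hv
    · exact le_trans h1 (min_le_right _ _)
    · exact h2 v hv

theorem pvVmin_le {ys : List Int} {mn : Int} (h : pvVmin ys = some mn) :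
    ∀ v ∈ ys, mn ≤ v := by
  cases ys with
  | nil => simp [pvVmin] at h
  | cons v t =>
    simp only [pvVmin, Option.some.injEq] at h
    subst h
    intro w hw
    rcases List.mem_cons.mp hw with rfl | hw
    · exact (foldl_min_le t w).1
    · exact (foldl_min_le t v).2 w hw

theorem pvDinsert_append {d : List (String × Int)} {k : String} (v : Int)
    (h : k ∉ d.map Prod.fst) : pvDinsert d k v = d ++ [(k, v)] := by
  unfold pvDinsert
  have hany : d.any (fun kv => kv.1 == k) = false := by
    simp only [List.any_eq_false, beq_iff_eq]
    intro kv hkv hk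
    exact h (List.mem_map.mpr ⟨kv, hkv, hk⟩)
  rw [hany]
  simp

theorem bfold (m : List (String × List Int)) : ∀ (d : List (String × Int)),
    (∀ k ∈ d.map Prod.fst, k ∉ m.map Prod.fst) →
    (m.map Prod.fst).Nodup →
    m.foldl (fun d pq => pvDinsert d pq.1 (pvMinv pq.2)) d = d ++ pvMins m := by
  induction m with
  | nil => intro d _ _; simp [pvMins]
  | cons x s ih =>
    intro d hdisj hnd
    simp only [List.map_cons, List.nodup_cons] at hnd
    have hx : x.1 ∉ d.map Prod.fst := by
      intro hmem
      exact hdisj x.1 hmem (by simp)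
    simp only [List.foldl_cons, pvDinsert_append _ hx]
    rw [ih (d ++ [(x.1, pvMinv x.2)]) ?_ hnd.2]
    · simp [pvMins]
    · intro k hk
      simp only [List.map_append, List.mem_append, List.map_cons] at hk
      rcases hk with hk | hk
      · exact fun hm => hdisj k hk (List.mem_cons_of_mem _ hm)
      · simp only [List.map_nil, List.mem_singleton] at hk
        subst hk; exact hnd.1

-- values of the per-player table
def pvVals (m : List (String × List Int)) : List Int := m.map (fun pq => pvMinv pq.2)

theorem pvVals_eq (m : List (String × List Int)) : (pvMins m).map Prod.snd = pvVals m := by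
  simp [pvMins, pvVals]

def pvStepA : (List (String × Int) × Option Int) → (String × List Int) → (List (String × Int) × Option Int) :=
  fun st pq =>
    let c := pvMinv pq.2
    match st.2 with
    | none => ([(pq.1, c)], some c)
    | some mn =>
      if c < mn then ([(pq.1, c)], some c)
      else if c = mn then (pvDinsert st.1 pq.1 mn, some mn)
      else st

theorem afold (m : List (String × List Int)) (hnd : (m.map Prod.fst).Nodup) :
    m.foldl pvStepA ([], none) =
      ((match pvVmin (pvVals m) with
        | none => []
        | some mn => (pvMins m).filter (fun pv => pv.2 == mn)),
       pvVmin (pvVals m)) := by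
  induction m using List.reverseRecOn with
  | nil => rfl
  | append_singleton s x ih =>
    have hnd' : (s.map Prod.fst).Nodup ∧ x.1 ∉ s.map Prod.fst := by
      simp only [List.map_append, List.map_cons, List.map_nil, List.nodup_append,
        List.nodup_cons, List.not_mem_nil, not_false_iff, List.nodup_nil] at hnd
      refine ⟨hnd.1, fun hm => ?_⟩
      exact hnd.2.2 _ hm x.1 (by simp) rfl
    rw [List.foldl_append, ih hnd'.1]
    have hvals : pvVals (s ++ [x]) = pvVals s ++ [pvMinv x.2] := by simp [pvVals]
    have hmins : pvMins (s ++ [x]) = pvMins s ++ [(x.1, pvMinv x.2)] := by simp [pvMins]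
    rw [hvals, hmins, pvVmin_snoc]
    cases hv : pvVmin (pvVals s) with
    | none =>
      -- s has no values, i.e. s = []
      have hs : pvVals s = [] := by
        cases hval : pvVals s with
        | nil => rfl
        | cons a t => rw [hval] at hv; simp [pvVmin] at hv
      have hsnil : s = [] := by
        cases s with
        | nil => rfl
        | cons a t => simp [pvVals] at hs
      subst hsnil
      simp [pvStepA, pvMins, List.foldl_cons]
    | some mn =>
      simp only [List.foldl_cons, List.foldl_nil, pvStepA]
      set c := pvMinv x.2 with hc
      by_cases hlt : c < mn
      · rw [if_pos hlt]
        have hmin : min mn c = c := min_eq_right (le_of_lt hlt)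
        rw [hmin]
        have hfilt : (pvMins s).filter (fun pv => pv.2 == c) = [] := by
          rw [List.filter_eq_nil_iff]
          intro pv hpv
          have : mn ≤ pv.2 := by
            apply pvVmin_le hv
            rw [← pvVals_eq]
            exact List.mem_map.mpr ⟨pv, hpv, rfl⟩
          simp only [beq_iff_eq]
          omega
        simp [List.filter_append, hfilt]
      · rw [if_neg hlt]
        by_cases heq : c = mn
        · rw [if_pos heq]
          have hmin : min mn c = mn := by omega
          rw [hmin]
          have hkeys : x.1 ∉ ((pvMins s).filter (fun pv => pv.2 == mn)).map Prod.fst := by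
            intro hm
            apply hnd'.2
            rcases List.mem_map.mp hm with ⟨pv, hpv, hfst⟩
            have hpv' := List.mem_of_mem_filter hpv
            rcases List.mem_map.mp hpv' with ⟨pq, hpq, hpq'⟩
            exact List.mem_map.mpr ⟨pq, hpq, by rw [← hfst, ← hpq']⟩
          rw [pvDinsert_append mn hkeys]
          simp [List.filter_append, heq]
        · rw [if_neg heq]
          have hmin : min mn c = mn := by omega
          rw [hmin]
          have : ((pvMins s ++ [(x.1, c)]).filter (fun pv => pv.2 == mn)) =
              (pvMins s).filter (fun pv => pv.2 == mn) := by
            simp [List.filter_append, heq]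
          rw [this]

theorem pvMins_nil_iff (m : List (String × List Int)) : pvMins m = [] ↔ m = [] := by
  simp [pvMins]

-- ===== VERDICT (by name: the statement is the Claim_ definition above) =====
theorem getBestLaptime_spec : Claim_equal_getBestLaptime := by
  intro m _ hpre
  unfold Spec_getBestLaptime getBestLaptime getBestLaptime_alt
  rw [show (fun (st : List (String × Int) × Option Int) (pq : String × List Int) =>
        let c := pvMinv pq.2
        match st.2 with
        | none => ([(pq.1, c)], some c)
        | some mn =>
          if c < mn then ([(pq.1, c)], some c)
          else if c = mn then (pvDinsert st.1 pq.1 mn, some mn)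
          else st) = pvStepA from rfl]
  rw [afold m hpre.1, bfold m [] (by simp) hpre.1]
  simp only [List.nil_append]
  by_cases hm : m = []
  · subst hm; simp [pvMins, pvVals, pvVmin]
  · have hne : pvMins m ≠ [] := fun h => hm ((pvMins_nil_iff m).mp h)
    rw [if_neg (by simpa [List.isEmpty_iff] using hne)]
    rw [pvVals_eq m, pvVmin_eq_min?]
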